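-- pv_equiv track=rewrite | github.com/YangSiJun528/jungle-mini-db | reum-koo/experiments/btree-library-benchmark/run_btree_library_benchmarks.py | describe_top_winners
-- ===== SOURCE A (Python) =====
-- def describe_top_winners(win_counts: dict[str, int], metric_name: str) -> str:
--     if not win_counts:
--         return f"- {metric_name} 우승 횟수를 계산할 데이터가 없었다."
--
--     top_count = max(win_counts.values())
--     winners = sorted([library for library, count in win_counts.items() if count == top_count])
--     if len(winners) == 1:
--         return f"- {metric_name} 1위 횟수는 `{winners[0]}`가 `{top_count}`회로 가장 많았다."
--     return f"- {metric_name} 1위 횟수는 `{', '.join(winners)}`가 공동 1위로 `{top_count}`회였다."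
-- ===== SOURCE B (Python) =====
-- def describe_top_winners(win_counts: dict[str, int], metric_name: str) -> str:
--     if not win_counts:
--         return f"- {metric_name} 우승 횟수를 계산할 데이터가 없었다."
--
--     best = None
--     winners = []
--     for library, count in win_counts.items():
--         if best is None or count > best:
--             best = count
--             winners = [library]
--         elif count == best:
--             winners.append(library)
--     winners.sort()
--     if len(winners) == 1:
--         return f"- {metric_name} 1위 횟수는 `{winners[0]}`가 `{best}`회로 가장 많았다."
--     return f"- {metric_name} 1위 횟수는 `{', '.join(winners)}`가 공동 1위로 `{best}`회였다."
-- ===== Notes on version B (the rewrite author's own statement) =====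
-- stated objective: alternative
-- what changed: Replaces A's three passes (max() over values, a filter comprehension, then sorted()) by a single fold that tracks the running best count and the list of names attaining it, sorting only the small winner list at the end.
import Mathlib
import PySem

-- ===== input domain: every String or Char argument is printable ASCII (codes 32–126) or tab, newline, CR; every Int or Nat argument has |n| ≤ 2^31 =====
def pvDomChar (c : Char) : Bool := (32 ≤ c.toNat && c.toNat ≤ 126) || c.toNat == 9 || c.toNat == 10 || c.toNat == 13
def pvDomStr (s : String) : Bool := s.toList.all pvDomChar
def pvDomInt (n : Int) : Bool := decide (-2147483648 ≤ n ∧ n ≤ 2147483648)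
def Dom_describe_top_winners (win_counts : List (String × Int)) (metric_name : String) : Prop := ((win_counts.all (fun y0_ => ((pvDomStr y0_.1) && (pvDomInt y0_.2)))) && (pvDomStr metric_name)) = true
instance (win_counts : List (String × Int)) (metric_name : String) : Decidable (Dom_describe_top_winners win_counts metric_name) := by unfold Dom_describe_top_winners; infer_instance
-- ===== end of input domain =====

-- B replaces A's three passes (max over values, filter comprehension, sort) by a single
-- fold tracking the running best count and its winner names, sorting only that list; same value everywhere.

-- ===== PORT A =====
def describe_top_winners (win_counts : List (String × Int)) (metric_name : String) : String :=
  if win_counts = [] then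
    "- " ++ metric_name ++ " 우승 횟수를 계산할 데이터가 없었다."
  else
    match PySem.List.max? (win_counts.map Prod.snd) (fun y => y) with
    | none => ""  -- unreachable: win_counts ≠ [] here
    | some top_count =>
      let winners := PySem.List.sorted ((win_counts.filter (fun p => p.2 == top_count)).map Prod.fst) (fun x => x) false
      if winners.length = 1 then
        "- " ++ metric_name ++ " 1위 횟수는 `" ++ winners.headD "" ++ "`가 `" ++ PySem.Int.toStr top_count ++ "`회로 가장 많았다."
      else
        "- " ++ metric_name ++ " 1위 횟수는 `" ++ PySem.Str.join ", " winners ++ "`가 공동 1위로 `" ++ PySem.Int.toStr top_count ++ "`회였다."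

-- ===== PORT B =====
-- one step of Source B's loop body: running best count (None before the first item) and its winners
def pvStep (acc : Option Int × List String) (p : String × Int) : Option Int × List String :=
  match acc with
  | (none, _) => (some p.2, [p.1])
  | (some b, ws) =>
    if p.2 > b then (some p.2, [p.1])
    else if p.2 = b then (some b, ws ++ [p.1])
    else (some b, ws)

def describe_top_winners_alt (win_counts : List (String × Int)) (metric_name : String) : String :=
  if win_counts = [] then
    "- " ++ metric_name ++ " 우승 횟수를 계산할 데이터가 없었다."
  else
    let st := win_counts.foldl pvStep (none, [])
    let winners := PySem.List.sorted st.2 (fun x => x) false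
    match st.1 with
    | none => ""  -- unreachable: best is set by the first iteration
    | some best =>
      if winners.length = 1 then
        "- " ++ metric_name ++ " 1위 횟수는 `" ++ winners.headD "" ++ "`가 `" ++ PySem.Int.toStr best ++ "`회로 가장 많았다."
      else
        "- " ++ metric_name ++ " 1위 횟수는 `" ++ PySem.Str.join ", " winners ++ "`가 공동 1위로 `" ++ PySem.Int.toStr best ++ "`회였다."

-- ===== PRECONDITION & SPEC =====
def Spec_describe_top_winners (win_counts : List (String × Int)) (metric_name : String) (out : String) : Prop := out = describe_top_winners_alt win_counts metric_name
instance (win_counts : List (String × Int)) (metric_name : String) (out : String) : Decidable (Spec_describe_top_winners win_counts metric_name out) := by unfold Spec_describe_top_winners; infer_instance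

-- ===== CLAIM (what is proved, stated in full; the proofs are below) =====
def Claim_equal_describe_top_winners : Prop := ∀ (win_counts : List (String × Int)) (metric_name : String), Dom_describe_top_winners win_counts metric_name → Spec_describe_top_winners win_counts metric_name (describe_top_winners win_counts metric_name)

-- ===== LEMMAS AND PROOFS =====

/-- running maximum of the counts of `l`, seeded with `b` -/
def pvMaxFrom (b : Int) (l : List (String × Int)) : Int :=
  l.foldl (fun a p => max a p.2) b

theorem le_pvMaxFrom (b : Int) (l : List (String × Int)) : b ≤ pvMaxFrom b l := by
  induction l generalizing b with
  | nil => simp [pvMaxFrom]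
  | cons p t ih =>
    calc b ≤ max b p.2 := le_max_left _ _
    _ ≤ pvMaxFrom (max b p.2) t := ih _
    _ = pvMaxFrom b (p :: t) := by simp [pvMaxFrom]

/-- names of the entries of `p :: t` whose count equals `M`, split at the head -/
theorem filter_names_cons (p : String × Int) (t : List (String × Int)) (M : Int) :
    ((p :: t).filter (fun q => q.2 == M)).map Prod.fst
      = (if p.2 = M then [p.1] else []) ++ (t.filter (fun q => q.2 == M)).map Prod.fst := by
  by_cases h : p.2 = M
  · simp [h]
  · have hb : (p.2 == M) = false := beq_eq_false_iff_ne.mpr h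
    simp [hb, h]

/-- invariant of Source B's loop: the fold computes the running max and the names attaining it -/
theorem fold_spec (l : List (String × Int)) : ∀ (b : Int) (ws : List String),
    l.foldl pvStep (some b, ws) =
      (some (pvMaxFrom b l),
       (if b = pvMaxFrom b l then ws else []) ++
         (l.filter (fun p => p.2 == pvMaxFrom b l)).map Prod.fst) := by
  induction l with
  | nil => intro b ws; simp [pvMaxFrom]
  | cons p t ih =>
    intro b ws
    have hM : pvMaxFrom b (p :: t) = pvMaxFrom (max b p.2) t := by simp [pvMaxFrom]
    rw [List.foldl_cons]
    rcases lt_trichotomy b p.2 with h1 | h1 | h1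
    · -- count > best: reset winners
      have hstep : pvStep (some b, ws) p = (some p.2, [p.1]) := by
        simp [pvStep, h1]
      have hmax : max b p.2 = p.2 := max_eq_right (le_of_lt h1)
      have hMM : pvMaxFrom b (p :: t) = pvMaxFrom p.2 t := by rw [hM, hmax]
      have hble : p.2 ≤ pvMaxFrom p.2 t := le_pvMaxFrom _ _
      have hbne : ¬ b = pvMaxFrom p.2 t := by omega
      rw [hstep, ih p.2 [p.1], hMM, filter_names_cons, if_neg hbne, List.nil_append]
    · -- count == best: append the name
      have hstep : pvStep (some b, ws) p = (some b, ws ++ [p.1]) := by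
        simp [pvStep, h1]
      have hmax : max b p.2 = b := by omega
      have hMM : pvMaxFrom b (p :: t) = pvMaxFrom b t := by rw [hM, hmax]
      rw [hstep, ih b (ws ++ [p.1]), hMM, filter_names_cons, ← h1]
      by_cases h2 : b = pvMaxFrom b t
      · rw [if_pos h2, if_pos h2, if_pos h2, List.append_assoc]
      · rw [if_neg h2, if_neg h2, if_neg h2, List.nil_append, List.nil_append]
    · -- count < best: skip
      have hstep : pvStep (some b, ws) p = (some b, ws) := by
        have hgt : ¬ p.2 > b := by omega
        have hne : ¬ p.2 = b := by omega
        simp [pvStep, hgt, hne]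
      have hmax : max b p.2 = b := by omega
      have hMM : pvMaxFrom b (p :: t) = pvMaxFrom b t := by rw [hM, hmax]
      have hlt : ¬ p.2 = pvMaxFrom b t := by
        have := le_pvMaxFrom b t; omega
      rw [hstep, ih b ws, hMM, filter_names_cons, if_neg hlt, List.nil_append]

-- ===== VERDICT (by name: the statement is the Claim_ definition above) =====
theorem describe_top_winners_spec : Claim_equal_describe_top_winners := by
  intro wc m _
  unfold Spec_describe_top_winners
  cases wc with
  | nil => rfl
  | cons p t =>
    have hfold := fold_spec t p.2 [p.1]
    have hmax : PySem.List.max? ((p :: t).map Prod.snd) (fun y => y)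
        = some (pvMaxFrom p.2 t) := by
      rw [List.map_cons, PySem.List.max?_id_cons, pvMaxFrom, List.foldl_map]
    simp only [describe_top_winners, describe_top_winners_alt, List.foldl_cons,
      if_neg (List.cons_ne_nil p t), hmax, filter_names_cons]
    have hstep0 : pvStep (none, ([] : List String)) p = (some p.2, [p.1]) := rfl
    rw [hstep0, hfold]
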